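-- pv_equiv track=rewrite | github.com/Cozzolindo/Vjudge-Python | blacknwhite.py | BNW
-- ===== SOURCE A (Python) =====
-- def BNW(n,k,let):
--
--     #let = list(let)
--     count = [0]*(n+1)
--
--     for i in range(1,n+1):
--         count[i]=count[i-1]
--         if(let[i-1] =='B'):
--             count[i]+=1
--
--     stripe = k
--     for i in range(k,n+1):
--         stripe = min(stripe, k-(count[i]-count[i-k]))
--     return int(stripe)
-- ===== SOURCE B (Python) =====
-- def BNW(n, k, let):
--     # One pass, sliding-window count of 'B's instead of a prefix-sum array.
--     stripe = k
--     b = 0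
--     for i in range(n):
--         if let[i] == 'B':
--             b += 1
--         if i >= k and let[i - k] == 'B':
--             b -= 1
--         if i >= k - 1:
--             stripe = min(stripe, k - b)
--     return int(stripe)
-- ===== Notes on version B (the rewrite author's own statement) =====
-- stated objective: simpler
-- what changed: Replaced the O(n) auxiliary prefix-sum array with a single pass keeping a running count of 'B's in the current length-k window (add the entering char, drop the leaving one), updating the minimum only once the window is full.
import Mathlib
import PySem

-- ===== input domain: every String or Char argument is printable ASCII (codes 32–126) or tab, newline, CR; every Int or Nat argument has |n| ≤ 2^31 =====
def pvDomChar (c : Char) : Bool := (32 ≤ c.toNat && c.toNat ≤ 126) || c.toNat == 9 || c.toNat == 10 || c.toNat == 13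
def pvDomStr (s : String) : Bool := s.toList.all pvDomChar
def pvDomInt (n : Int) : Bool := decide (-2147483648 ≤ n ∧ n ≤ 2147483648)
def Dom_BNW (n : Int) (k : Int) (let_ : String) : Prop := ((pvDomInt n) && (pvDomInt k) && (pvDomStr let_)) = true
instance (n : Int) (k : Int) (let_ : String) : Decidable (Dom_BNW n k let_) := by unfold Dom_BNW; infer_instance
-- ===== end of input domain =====

-- B replaces A's prefix-sum array with a one-pass sliding-window counter of 'B's (same O(n) time, O(1) extra space).


-- ===== PORT A =====
def BNW (n : Int) (k : Int) (let_ : String) : Int :=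
  let cs := let_.toList
  let count : List Int :=
    (PySem.List.pyRange 1 (n + 1) 1).foldl (fun count i =>
      let v := PySem.List.pyGetD count (i - 1) 0
      let v := if PySem.List.pyGetD cs (i - 1) ' ' = 'B' then v + 1 else v
      PySem.List.pySetD count i v) (List.replicate (n + 1).toNat 0)
  (PySem.List.pyRange k (n + 1) 1).foldl (fun stripe i =>
    min stripe (k - (PySem.List.pyGetD count i 0 - PySem.List.pyGetD count (i - k) 0))) k

-- ===== PORT B =====
def BNW_alt (n : Int) (k : Int) (let_ : String) : Int :=
  let cs := let_.toList
  let r := (PySem.List.pyRange 0 n 1).foldl (fun (st : Int × Int) i =>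
      let b := if PySem.List.pyGetD cs i ' ' = 'B' then st.2 + 1 else st.2
      let b := if k ≤ i ∧ PySem.List.pyGetD cs (i - k) ' ' = 'B' then b - 1 else b
      let stripe := if k - 1 ≤ i then min st.1 (k - b) else st.1
      (stripe, b)) (k, 0)
  r.1

-- ===== PRECONDITION & SPEC =====
-- Pre_ excludes exactly the inputs on which A raises IndexError: A needs 0 ≤ n ≤ len(let) and 0 ≤ k,
-- except that when n < 0 and n < k both of A's loops are empty and A returns k without any indexing.
def Pre_BNW (n : Int) (k : Int) (let_ : String) : Prop :=
  (0 ≤ n ∧ n ≤ PySem.Str.len let_ ∧ 0 ≤ k) ∨ (n < 0 ∧ n < k)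
instance (n : Int) (k : Int) (let_ : String) : Decidable (Pre_BNW n k let_) := by
  unfold Pre_BNW; infer_instance
def pvWitness_BNW : Int × Int × String := (3, 2, "BWB")
def Spec_BNW (n : Int) (k : Int) (let_ : String) (out : Int) : Prop := out = BNW_alt n k let_
instance (n : Int) (k : Int) (let_ : String) (out : Int) : Decidable (Spec_BNW n k let_ out) := by unfold Spec_BNW; infer_instance

-- ===== CLAIM (what is proved, stated in full; the proofs are below) =====
def Claim_equal_BNW : Prop := ∀ (n : Int) (k : Int) (let_ : String), Dom_BNW n k let_ → Pre_BNW n k let_ → Spec_BNW n k let_ (BNW n k let_)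

-- ===== LEMMAS AND PROOFS =====

-- prefix count of 'B' among the first j characters (the value A stores in count[j])
def pcount (cs : List Char) (j : Nat) : Int := (((cs.take j).countP (fun c => c = 'B') : Nat) : Int)

theorem pcount_succ (cs : List Char) (j : Nat) (h : j < cs.length) :
    pcount cs (j + 1) = pcount cs j + (if cs[j] = 'B' then 1 else 0) := by
  unfold pcount
  rw [List.take_add_one, List.getElem?_eq_getElem h, Option.toList_some, List.countP_append,
    List.countP_singleton]
  by_cases hc : cs[j] = 'B' <;> simp [hc]

-- A's first loop builds exactly the prefix-count table (invariant after the first j iterations)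
theorem countA_inv (cs : List Char) (m : Nat) (hm : m ≤ cs.length) (j : Nat) (hj : j ≤ m) :
    (PySem.List.pyRange 1 ((j : Int) + 1) 1).foldl (fun count i =>
      let v := PySem.List.pyGetD count (i - 1) 0
      let v := if PySem.List.pyGetD cs (i - 1) ' ' = 'B' then v + 1 else v
      PySem.List.pySetD count i v) (List.replicate (m + 1) 0)
    = (List.range (j + 1)).map (pcount cs) ++ List.replicate (m - j) 0 := by
  induction j with
  | zero =>
    rw [PySem.List.pyRange_one_eq_nil (by omega)]
    simp [List.replicate_succ, pcount]
  | succ j ih =>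
    have hj' : j ≤ m := by omega
    rw [show ((j + 1 : Nat) : Int) + 1 = ((j : Int) + 1) + 1 by push_cast; ring,
      PySem.List.pyRange_one_succ_right (by omega), List.foldl_append, ih hj']
    simp only [List.foldl_cons, List.foldl_nil]
    have hlen : ((List.range (j + 1)).map (pcount cs)).length = j + 1 := by simp
    have hget1 : PySem.List.pyGetD ((List.range (j + 1)).map (pcount cs) ++ List.replicate (m - j) 0) ((j : Int) + 1 - 1) 0 = pcount cs j := by
      rw [show ((j : Int) + 1 - 1) = ((j : Nat) : Int) by ring, PySem.List.pyGetD_natCast,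
        List.getD_append _ _ _ _ (by omega)]
      simp
    have hget2 : PySem.List.pyGetD cs ((j : Int) + 1 - 1) ' ' = cs.getD j ' ' := by
      rw [show ((j : Int) + 1 - 1) = ((j : Nat) : Int) by ring, PySem.List.pyGetD_natCast]
    have hcs : cs.getD j ' ' = cs[j]'(by omega) := List.getD_eq_getElem cs ' ' (by omega)
    rw [hget1, hget2, hcs]
    rw [show ((j : Int) + 1) = ((j + 1 : Nat) : Int) by push_cast; ring, PySem.List.pySetD_natCast]
    rw [List.set_append_right _ _ (by omega)]
    have hrep : (List.replicate (m - j) (0:Int)).set ((j+1) - ((List.range (j + 1)).map (pcount cs)).length)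
        (if cs[j]'(by omega) = 'B' then pcount cs j + 1 else pcount cs j)
        = (if cs[j]'(by omega) = 'B' then pcount cs j + 1 else pcount cs j) :: List.replicate (m - (j+1)) 0 := by
      rw [hlen, Nat.sub_self, show m - j = (m - (j+1)) + 1 by omega, List.replicate_succ, List.set_cons_zero]
    have : pcount cs (j + 1) = (if cs[j]'(by omega) = 'B' then pcount cs j + 1 else pcount cs j) := by
      rw [pcount_succ cs j (by omega)]; split_ifs <;> ring
    rw [hrep, ← this]
    simp [List.range_succ]

-- B's loop invariant: after the first m iterations the state is
-- (the window-minimum over all windows ending at w ≤ m, the 'B'-count of the current window)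
theorem foldB_eq (cs : List Char) (k : Int) (hk : 0 ≤ k) (m : Nat) (hm : m ≤ cs.length) :
    (PySem.List.pyRange 0 (m : Int) 1).foldl (fun (st : Int × Int) i =>
      let b := if PySem.List.pyGetD cs i ' ' = 'B' then st.2 + 1 else st.2
      let b := if k ≤ i ∧ PySem.List.pyGetD cs (i - k) ' ' = 'B' then b - 1 else b
      let stripe := if k - 1 ≤ i then min st.1 (k - b) else st.1
      (stripe, b)) (k, 0)
    = ((PySem.List.pyRange k ((m : Int) + 1) 1).foldl (fun stripe w =>
        min stripe (k - (pcount cs w.toNat - pcount cs (w.toNat - k.toNat)))) k,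
       pcount cs m - pcount cs (m - k.toNat)) := by
  induction m with
  | zero =>
    rw [PySem.List.pyRange_one_eq_nil (by omega)]
    by_cases h0 : k = 0
    · subst h0
      rw [show ((0:Nat):Int) + 1 = 0 + 1 by norm_num, PySem.List.pyRange_one_singleton]
      simp [pcount]
    · rw [PySem.List.pyRange_one_eq_nil (by omega)]
      simp [pcount]
  | succ m ih =>
    have hm' : m ≤ cs.length := by omega
    rw [show ((m + 1 : Nat) : Int) = ((m : Int)) + 1 by push_cast; ring,
      PySem.List.pyRange_one_succ_right (by omega), List.foldl_append, ih hm']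
    simp only [List.foldl_cons, List.foldl_nil]
    have hcs : PySem.List.pyGetD cs ((m:Nat):Int) ' ' = cs[m]'(by omega) := by
      rw [PySem.List.pyGetD_natCast]; exact List.getD_eq_getElem cs ' ' (by omega)
    have hb1 : (if PySem.List.pyGetD cs ((m:Nat):Int) ' ' = 'B'
        then (pcount cs m - pcount cs (m - k.toNat)) + 1 else (pcount cs m - pcount cs (m - k.toNat)))
        = pcount cs (m+1) - pcount cs (m - k.toNat) := by
      rw [hcs, pcount_succ cs m (by omega)]; split_ifs <;> ring
    rw [hb1]
    have hb2 : (if k ≤ ((m:Nat):Int) ∧ PySem.List.pyGetD cs (((m:Nat):Int) - k) ' ' = 'B'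
        then (pcount cs (m+1) - pcount cs (m - k.toNat)) - 1 else (pcount cs (m+1) - pcount cs (m - k.toNat)))
        = pcount cs (m+1) - pcount cs ((m+1) - k.toNat) := by
      by_cases hkm : k.toNat ≤ m
      · have hki : k ≤ ((m:Nat):Int) := by omega
        have hcast : ((m:Nat):Int) - k = (((m - k.toNat : Nat)):Int) := by omega
        have hget : PySem.List.pyGetD cs (((m:Nat):Int) - k) ' ' = cs[m - k.toNat]'(by omega) := by
          rw [hcast, PySem.List.pyGetD_natCast]; exact List.getD_eq_getElem cs ' ' (by omega)
        have hsucc : pcount cs ((m - k.toNat) + 1) = pcount cs (m - k.toNat)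
            + (if cs[m - k.toNat]'(by omega) = 'B' then 1 else 0) := pcount_succ cs _ (by omega)
        have harith : (m + 1) - k.toNat = (m - k.toNat) + 1 := by omega
        rw [harith, hsucc, hget]
        by_cases hB : cs[m - k.toNat]'(by omega) = 'B'
        · rw [if_pos ⟨hki, hB⟩, if_pos hB]; ring
        · rw [if_neg (fun h => hB h.2), if_neg hB]; ring
      · have : ¬ (k ≤ ((m:Nat):Int) ∧ PySem.List.pyGetD cs (((m:Nat):Int) - k) ' ' = 'B') := by
          rintro ⟨h1, -⟩; omega
        rw [if_neg this, show (m + 1) - k.toNat = m - k.toNat by omega]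
    rw [hb2]
    by_cases hkm : k ≤ (m : Int) + 1
    · rw [if_pos (by omega), PySem.List.pyRange_one_succ_right hkm, List.foldl_append]
      simp only [List.foldl_cons, List.foldl_nil]
      have : ((m:Int) + 1).toNat = m + 1 := by omega
      rw [this]
    · rw [if_neg (by omega), PySem.List.pyRange_one_eq_nil (by omega),
        PySem.List.pyRange_one_eq_nil (by omega)]

-- ===== VERDICT (by name: the statement is the Claim_ definition above) =====
theorem BNW_spec : Claim_equal_BNW := by
  intro n k let_ _hdom hpre
  unfold Spec_BNW BNW BNW_alt
  dsimp only
  rcases hpre with ⟨hn0, hnlen, hk0⟩ | ⟨hn, hnk⟩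
  · -- the regular case: 0 ≤ n ≤ len(let), 0 ≤ k
    have hlen : n ≤ (let_.toList.length : Int) := by
      simpa [PySem.Str.len_eq] using hnlen
    obtain ⟨m, rfl⟩ : ∃ m : Nat, n = (m : Int) := ⟨n.toNat, by omega⟩
    have hm : m ≤ let_.toList.length := by exact_mod_cast hlen
    have hrep : ((m : Int) + 1).toNat = m + 1 := by omega
    rw [hrep, countA_inv let_.toList m hm m (le_refl m), Nat.sub_self, List.replicate_zero,
      List.append_nil, foldB_eq let_.toList k hk0 m hm]
    apply PySem.List.foldl_congr_mem
    intro acc w hw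
    rw [PySem.List.mem_pyRange_one] at hw
    have hw0 : (0:Int) ≤ w := by omega
    have hwt : w = ((w.toNat : Nat) : Int) := by omega
    have h1 : PySem.List.pyGetD ((List.range (m + 1)).map (pcount let_.toList)) w 0
        = pcount let_.toList w.toNat := by
      rw [hwt, PySem.List.pyGetD_natCast, List.getD_eq_getElem _ _ (by simp; omega)]
      simp
      congr 1
      omega
    have hcast : w - k = (((w.toNat - k.toNat : Nat)) : Int) := by omega
    have h2 : PySem.List.pyGetD ((List.range (m + 1)).map (pcount let_.toList)) (w - k) 0
        = pcount let_.toList (w.toNat - k.toNat) := by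
      rw [hcast, PySem.List.pyGetD_natCast, List.getD_eq_getElem _ _ (by simp; omega)]
      simp
    rw [h1, h2]
  · -- n < 0 < k - n: all three loops are empty and both sides return k
    rw [PySem.List.pyRange_one_eq_nil (show (n:Int) + 1 ≤ 1 by omega),
      PySem.List.pyRange_one_eq_nil (show (n:Int) + 1 ≤ k by omega),
      PySem.List.pyRange_one_eq_nil (show (n:Int) ≤ 0 by omega)]
    rfl
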